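-- pv_equiv track=rewrite | github.com/sutormin94/Sponge_metagenomes_2024 | Prepare_16S_dataset_for_multiple_alignment.py | add_GenBank_info
-- ===== SOURCE A (Python) =====
-- def add_GenBank_info(seq_dict, gb_dict):
--
--     seq_dict_upd={}
--
--     for fasta_record_name, fasta_seq in seq_dict.items():
--         check_add=0
--
--         for gb_id, gb_info in gb_dict.items():
--             if gb_id in fasta_record_name:
--                 fasta_record_name_upd=f'{fasta_record_name}##{gb_info}'
--                 seq_dict_upd[fasta_record_name_upd]=fasta_seq
--                 check_add+=1
--
--         if check_add==0:
--             seq_dict_upd[fasta_record_name]=fasta_seq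
--
--     return seq_dict_upd
-- ===== SOURCE B (Python) =====
-- def add_GenBank_info(seq_dict, gb_dict):
--     # Inverted traversal: first collect all (record_name, gb_info) hits gb-major,
--     # group them into an index keyed by record name, then one pass over the
--     # records re-emits tagged copies (or the record unchanged when unmatched).
--     hits = [(name, gb_info)
--             for gb_id, gb_info in gb_dict.items()
--             for name in seq_dict
--             if gb_id in name]
--     matches = {}
--     for name, info in hits:
--         matches.setdefault(name, []).append(info)
--     out = {}
--     for name, seq in seq_dict.items():
--         if name in matches:
--             for info in matches[name]:
--                 out[f'{name}##{info}'] = seq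
--         else:
--             out[name] = seq
--     return out
-- ===== Notes on version B (the rewrite author's own statement) =====
-- stated objective: alternative
-- what changed: Inverts the traversal: instead of A's record-major nested scan with an in-loop counter and insertions, B first collects all (record, info) hits gb-major, groups them into an index dict keyed by record name, and then a single pass over the records emits the tagged copies from the index (or the record unchanged when absent).
import Mathlib
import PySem

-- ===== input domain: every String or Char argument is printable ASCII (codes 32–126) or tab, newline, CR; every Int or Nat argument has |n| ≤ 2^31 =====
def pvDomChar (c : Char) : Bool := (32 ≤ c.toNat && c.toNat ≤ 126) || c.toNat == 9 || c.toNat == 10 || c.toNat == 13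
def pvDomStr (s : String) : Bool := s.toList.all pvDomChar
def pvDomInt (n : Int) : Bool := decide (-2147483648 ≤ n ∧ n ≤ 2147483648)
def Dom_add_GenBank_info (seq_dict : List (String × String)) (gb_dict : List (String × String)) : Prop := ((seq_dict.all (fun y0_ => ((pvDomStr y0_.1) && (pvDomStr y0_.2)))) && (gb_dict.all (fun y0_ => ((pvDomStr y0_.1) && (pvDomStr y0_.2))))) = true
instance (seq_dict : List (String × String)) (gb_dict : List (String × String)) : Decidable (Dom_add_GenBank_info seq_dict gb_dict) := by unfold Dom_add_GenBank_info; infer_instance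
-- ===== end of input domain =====

-- B inverts A's traversal: it gathers (record, info) hits gb-major, groups them into an index keyed by record name, and re-emits records in one pass (alternative decomposition, same cost).


-- ===== PORT A =====
-- literal port: record-major nested loop over the two dicts, inserting a tagged copy
-- per match, counting matches in check_add, inserting the record unchanged if none
def add_GenBank_info (seq_dict : List (String × String)) (gb_dict : List (String × String)) : List (String × String) :=
  let gd := PySem.Dict.ofList gb_dict
  let upd := (PySem.Dict.ofList seq_dict).items.foldl
    (fun (upd : PySem.Dict String String) p =>
      let r := gd.items.foldl
        (fun (acc : PySem.Dict String String × Int) q =>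
          if PySem.Str.isIn q.1 p.1 then
            (acc.1.insert (p.1 ++ "##" ++ q.2) p.2, acc.2 + 1)
          else acc)
        (upd, 0)
      if r.2 = 0 then r.1.insert p.1 p.2 else r.1)
    PySem.Dict.empty
  upd.items

-- ===== PORT B =====
-- gb-major hit list: for each gb entry, the matching record names paired with its info
def pvHits (names : List String) (gbItems : List (String × String)) : List (String × String) :=
  gbItems.flatMap (fun q => (names.filter (fun name => PySem.Str.isIn q.1 name)).map (fun name => (name, q.2)))

-- group the hits into an index: record name -> list of infos (setdefault/append loop)
def pvIndex (hits : List (String × String)) : PySem.Dict String (List String) :=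
  hits.foldl (fun d p => d.modify p.1 [] (· ++ [p.2])) PySem.Dict.empty

def add_GenBank_info_alt (seq_dict : List (String × String)) (gb_dict : List (String × String)) : List (String × String) :=
  let S := (PySem.Dict.ofList seq_dict).items
  let idx := pvIndex (pvHits (S.map (·.1)) (PySem.Dict.ofList gb_dict).items)
  (S.foldl
    (fun (out : PySem.Dict String String) p =>
      if idx.contains p.1 then
        (idx.getD p.1 []).foldl (fun out info => out.insert (p.1 ++ "##" ++ info) p.2) out
      else out.insert p.1 p.2)
    PySem.Dict.empty).items

-- ===== PRECONDITION & SPEC =====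
def Spec_add_GenBank_info (seq_dict : List (String × String)) (gb_dict : List (String × String)) (out : List (String × String)) : Prop := out = add_GenBank_info_alt seq_dict gb_dict
instance (seq_dict : List (String × String)) (gb_dict : List (String × String)) (out : List (String × String)) : Decidable (Spec_add_GenBank_info seq_dict gb_dict out) := by unfold Spec_add_GenBank_info; infer_instance

-- ===== CLAIM (what is proved, stated in full; the proofs are below) =====
def Claim_equal_add_GenBank_info : Prop := ∀ (seq_dict : List (String × String)) (gb_dict : List (String × String)), Dom_add_GenBank_info seq_dict gb_dict → Spec_add_GenBank_info seq_dict gb_dict (add_GenBank_info seq_dict gb_dict)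

-- ===== LEMMAS AND PROOFS =====

-- A's inner loop (conditional insert plus counter) equals folding the filtered list,
-- with the counter ending at the number of matches
theorem pv_inner {β γ : Type} (t : β → Bool) (f : γ → β → γ)
    (G : List β) (d : γ) (c : Int) :
    G.foldl (fun acc q => if t q then (f acc.1 q, acc.2 + 1) else acc) (d, c)
    = ((G.filter t).foldl f d, c + ((G.filter t).length : Int)) := by
  induction G generalizing d c with
  | nil => simp
  | cons q G ih =>
    by_cases h : t q = true
    · simp only [List.foldl_cons, h, if_pos, List.filter_cons_of_pos h, List.length_cons, ih]
      simp only [Prod.mk.injEq, true_and]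
      push_cast
      ring
    · simp only [List.foldl_cons, if_neg h, List.filter_cons_of_neg h, ih]

-- filtering a filtered nodup list for one known member keeps exactly that member (if it passes)
theorem pv_filter_single (names : List String) (t : String → Bool) (name : String)
    (hnd : names.Nodup) (hmem : name ∈ names) :
    (names.filter t).filter (fun n => n == name) = if t name then [name] else [] := by
  induction names with
  | nil => cases hmem
  | cons a names ih =>
    rcases List.mem_cons.1 hmem with rfl | hmem'
    · have hnot : name ∉ names := (List.nodup_cons.1 hnd).1
      have hrest : (names.filter t).filter (fun n => n == name) = [] := by
        refine List.filter_eq_nil_iff.2 ?_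
        intro n hn hb
        have hn2 : n = name := by simpa using hb
        exact hnot (hn2 ▸ List.mem_of_mem_filter hn)
      by_cases ht : t name = true <;> simp [ht, hrest]
    · have hne : (a == name) = false := by
        have : a ≠ name := fun h => (List.nodup_cons.1 hnd).1 (h ▸ hmem')
        simpa using this
      have := ih (List.nodup_cons.1 hnd).2 hmem'
      by_cases ht : t a = true
      · simpa [List.filter_cons, ht, hne] using this
      · simpa [List.filter_cons, ht] using this

-- selecting one record's hits from the gb-major hit list recovers, in gb order,
-- exactly the infos of the gb entries matching that record (names nodup, name among them)
theorem pv_hits_at (names : List String) (G : List (String × String)) (name : String)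
    (hnd : names.Nodup) (hmem : name ∈ names) :
    ((pvHits names G).filter (fun p => p.1 == name))
      = (G.filter (fun q => PySem.Str.isIn q.1 name)).map (fun q => (name, q.2)) := by
  induction G with
  | nil => rfl
  | cons q G ih =>
    simp only [pvHits, List.flatMap_cons, List.filter_append] at *
    rw [ih]
    have hblock : ((names.filter (fun n => PySem.Str.isIn q.1 n)).map
          (fun n => (n, q.2))).filter (fun p => p.1 == name)
        = if PySem.Str.isIn q.1 name then [(name, q.2)] else [] := by
      rw [List.filter_map]
      have hcomp : ((fun p : String × String => p.1 == name) ∘ fun n => (n, q.2))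
          = fun n => n == name := rfl
      rw [hcomp, pv_filter_single names _ name hnd hmem]
      split <;> simp
    rw [hblock]
    by_cases hm : PySem.Chars.isIn q.1.toList name.toList = true <;>
      simp [PySem.Str.isIn_eq, hm]

-- the index's entry at a record name is the info list of that record's hits
theorem pv_index_getD (hits : List (String × String)) (name : String) :
    (pvIndex hits).getD name [] = (hits.filter (fun p => p.1 == name)).map (·.2) := by
  simpa [pvIndex] using
    PySem.Dict.getD_foldl_modify_append hits PySem.Dict.empty name

-- the index contains a name iff it occurs among the hits
theorem pv_index_contains (hits : List (String × String)) (name : String) :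
    (pvIndex hits).contains name = true ↔ name ∈ hits.map (·.1) := by
  rw [PySem.Dict.contains_iff_mem_keys]
  simp only [pvIndex, PySem.Dict.keys_foldl_modify_key (key := fun p : String × String => p.1)]
  rw [show (PySem.Dict.empty : PySem.Dict String (List String)).keys = [] from rfl,
    PySem.Set.update_nil_left, PySem.Set.mem_ofList]

-- per-record step equality: A's inner loop with counter and fallback equals B's
-- index lookup (tagged re-emission, or plain insert when the index misses)
theorem pv_step (names : List String) (G : List (String × String))
    (hnd : names.Nodup)
    (upd : PySem.Dict String String) (p : String × String) (hp : p.1 ∈ names) :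
    (let r := G.foldl
        (fun (acc : PySem.Dict String String × Int) q =>
          if PySem.Str.isIn q.1 p.1 then
            (acc.1.insert (p.1 ++ "##" ++ q.2) p.2, acc.2 + 1)
          else acc)
        (upd, 0)
      if r.2 = 0 then r.1.insert p.1 p.2 else r.1)
    = (let idx := pvIndex (pvHits names G)
      if idx.contains p.1 then
        (idx.getD p.1 []).foldl (fun out info => out.insert (p.1 ++ "##" ++ info) p.2) upd
      else upd.insert p.1 p.2) := by
  rw [pv_inner (fun q => PySem.Str.isIn q.1 p.1)
      (fun a q => a.insert (p.1 ++ "##" ++ q.2) p.2) G upd 0]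
  have hidx := pv_index_getD (pvHits names G) p.1
  rw [pv_hits_at names G p.1 hnd hp] at hidx
  by_cases h : (G.filter (fun q => PySem.Str.isIn q.1 p.1)) = []
  · have hc : (pvIndex (pvHits names G)).contains p.1 = false := by
      rw [← Bool.not_eq_true, pv_index_contains]
      intro hmem
      rcases List.mem_map.1 hmem with ⟨r, hr, hr1⟩
      rcases List.mem_flatMap.1 hr with ⟨g, hg, hg2⟩
      rcases List.mem_map.1 hg2 with ⟨n, hn, rfl⟩
      have hn' := List.mem_filter.1 hn
      have hn1 : n = p.1 := by simpa using hr1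
      exact (List.filter_eq_nil_iff.1 h g hg)
        (by simpa [PySem.Str.isIn_eq, hn1] using hn'.2)
    rw [h]
    simp [hc]
  · have hlen : ((G.filter (fun q => PySem.Str.isIn q.1 p.1)).length : Int) ≠ 0 := by
      exact_mod_cast (by simpa [List.length_eq_zero_iff] using h :
        (G.filter (fun q => PySem.Str.isIn q.1 p.1)).length ≠ 0)
    have hc : (pvIndex (pvHits names G)).contains p.1 = true := by
      rw [pv_index_contains]
      rcases List.exists_mem_of_ne_nil _ h with ⟨g, hg⟩
      have hg' := List.mem_filter.1 hg
      refine List.mem_map.2 ⟨(p.1, g.2), ?_, rfl⟩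
      exact List.mem_flatMap.2 ⟨g, hg'.1,
        List.mem_map.2 ⟨p.1, List.mem_filter.2 ⟨hp, hg'.2⟩, rfl⟩⟩
    simp only [hc, if_true, hidx]
    rw [if_neg (by simpa using hlen)]
    simp [List.foldl_map]

-- ===== VERDICT (by name: the statement is the Claim_ definition above) =====
theorem add_GenBank_info_spec : Claim_equal_add_GenBank_info := by
  intro seq_dict gb_dict _
  show _ = _
  simp only [add_GenBank_info, add_GenBank_info_alt]
  congr 1
  refine PySem.List.foldl_congr_mem _ _ _ _ ?_
  intro upd p hpmem
  have hnd : ((PySem.Dict.ofList seq_dict).items.map (·.1)).Nodup := by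
    simpa [PySem.Dict.keys] using PySem.Dict.nodup_keys_ofList (κ := String) seq_dict
  have hp : p.1 ∈ (PySem.Dict.ofList seq_dict).items.map (·.1) :=
    List.mem_map.2 ⟨p, hpmem, rfl⟩
  exact pv_step _ _ hnd upd p hp
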